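-- pv_equiv track=rewrite | github.com/TurtleTools/portein | portein/plot.py | get_residues_colors
-- ===== SOURCE A (Python) =====
-- from itertools import groupby
-- from operator import itemgetter
--
-- def get_residues_colors(highlight_residues):
--     chain_to_residue_range_color = {}
--     for chain in highlight_residues:
--         chain_to_residue_range_color[chain] = {}
--         for color, residues in highlight_residues[chain].items():
--             residues = sorted(residues)
--             residue_ranges = []
--             for _, g in groupby(enumerate(residues), lambda ix: ix[0] - ix[1]):
--                 group = list(map(itemgetter(1), g))
--                 residue_ranges.append((group[0], group[-1]))
--             chain_to_residue_range_color[chain][color] = residue_ranges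
--     return chain_to_residue_range_color
-- ===== SOURCE B (Python) =====
-- def get_residues_colors(highlight_residues):
--     def collapse(xs):
--         rr = []
--         if xs:
--             start = prev = xs[0]
--             for x in xs[1:]:
--                 if x == prev + 1:
--                     prev = x
--                 else:
--                     rr.append((start, prev))
--                     start = prev = x
--             rr.append((start, prev))
--         return rr
--     return {chain: {color: collapse(sorted(residues))
--                     for color, residues in highlight_residues[chain].items()}
--             for chain in highlight_residues}
-- ===== Notes on version B (the rewrite author's own statement) =====
-- stated objective: simpler
-- what changed: Replaces the groupby/enumerate/itemgetter index-offset trick with a direct gap-detection pass maintaining start/prev, and the nested dict building with dict comprehensions.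
import Mathlib
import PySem

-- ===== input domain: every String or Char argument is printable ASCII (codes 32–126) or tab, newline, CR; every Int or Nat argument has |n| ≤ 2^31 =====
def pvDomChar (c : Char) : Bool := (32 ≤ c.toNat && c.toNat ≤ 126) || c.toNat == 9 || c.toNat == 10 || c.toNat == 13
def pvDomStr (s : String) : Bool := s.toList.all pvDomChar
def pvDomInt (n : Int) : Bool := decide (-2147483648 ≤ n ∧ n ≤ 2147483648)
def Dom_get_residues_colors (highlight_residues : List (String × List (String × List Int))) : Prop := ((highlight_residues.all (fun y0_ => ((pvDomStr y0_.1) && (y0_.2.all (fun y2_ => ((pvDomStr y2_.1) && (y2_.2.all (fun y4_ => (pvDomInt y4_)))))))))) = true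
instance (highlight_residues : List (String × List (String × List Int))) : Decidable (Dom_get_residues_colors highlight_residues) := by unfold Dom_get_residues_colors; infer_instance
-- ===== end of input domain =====

-- B replaces the groupby/enumerate/itemgetter index-offset trick with a direct
-- gap-detection pass (start/prev) over the sorted list; same cost, simpler code.

-- ===== PORT A =====
def pvKey (p : Int × Int) : Int := p.1 - p.2

-- groupby(enumerate(residues), lambda ix: ix[0] - ix[1]): maximal runs of equal key
def pvGroupsA : List (Int × Int) → List (List (Int × Int))
  | [] => []
  | p :: rest =>
    (p :: rest.takeWhile (fun q => pvKey q == pvKey p)) ::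
      pvGroupsA (rest.dropWhile (fun q => pvKey q == pvKey p))
termination_by l => l.length
decreasing_by
  have := List.Sublist.length_le (List.dropWhile_sublist (l := rest) (p := fun q => pvKey q == pvKey p))
  simp; omega

-- (group[0], group[-1]) of a groupby group (groups are never empty)
def pvPair (g : List (Int × Int)) : Int × Int := ((g.headD (0, 0)).2, (g.getLastD (0, 0)).2)

def pvRangesA (residues : List Int) : List (Int × Int) :=
  (pvGroupsA (PySem.List.enumerate (PySem.List.sorted residues (fun x => x) false))).map pvPair

def get_residues_colors (highlight_residues : List (String × List (String × List Int))) : List (String × List (String × List (Int × Int))) :=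
  (highlight_residues.foldl
     (fun (d : PySem.Dict String (List (String × List (Int × Int)))) ch =>
       d.insert ch.1
         ((((PySem.Dict.mk highlight_residues).getD ch.1 []).foldl
             (fun (inner : PySem.Dict String (List (Int × Int))) cv =>
               inner.insert cv.1 (pvRangesA cv.2))
             PySem.Dict.empty).items))
     PySem.Dict.empty).items

-- ===== PORT B =====
-- the explicit gap-detection loop of Source B's collapse (rr is the appended accumulator)
def pvRun : List Int → Int → Int → List (Int × Int) → List (Int × Int)
  | [], start, prev, rr => rr ++ [(start, prev)]
  | x :: t, start, prev, rr =>
    if x = prev + 1 then pvRun t start x rr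
    else pvRun t x x (rr ++ [(start, prev)])

def pvCollapse : List Int → List (Int × Int)
  | [] => []
  | x :: t => pvRun t x x []

def get_residues_colors_alt (highlight_residues : List (String × List (String × List Int))) : List (String × List (String × List (Int × Int))) :=
  (highlight_residues.foldl
     (fun (d : PySem.Dict String (List (String × List (Int × Int)))) ch =>
       d.insert ch.1
         ((((PySem.Dict.mk highlight_residues).getD ch.1 []).foldl
             (fun (inner : PySem.Dict String (List (Int × Int))) cv =>
               inner.insert cv.1 (pvCollapse (PySem.List.sorted cv.2 (fun x => x) false)))
             PySem.Dict.empty).items))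
     PySem.Dict.empty).items

-- ===== PRECONDITION & SPEC =====
def Spec_get_residues_colors (highlight_residues : List (String × List (String × List Int))) (out : List (String × List (String × List (Int × Int)))) : Prop := out = get_residues_colors_alt highlight_residues
instance (highlight_residues : List (String × List (String × List Int))) (out : List (String × List (String × List (Int × Int)))) : Decidable (Spec_get_residues_colors highlight_residues out) := by unfold Spec_get_residues_colors; infer_instance

-- ===== CLAIM (what is proved, stated in full; the proofs are below) =====
def Claim_equal_get_residues_colors : Prop := ∀ (highlight_residues : List (String × List (String × List Int))), Dom_get_residues_colors highlight_residues → Spec_get_residues_colors highlight_residues (get_residues_colors highlight_residues)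

-- ===== LEMMAS AND PROOFS =====

-- reference recursion both grouping passes are reduced to
def pvHeadRepl (x : Int) : List (Int × Int) → List (Int × Int)
  | [] => []
  | (_, b) :: rs => (x, b) :: rs

def pvRanges (x : Int) : List Int → List (Int × Int)
  | [] => [(x, x)]
  | y :: t => if y = x + 1 then pvHeadRepl x (pvRanges y t) else (x, x) :: pvRanges y t

lemma pvRanges_shape : ∀ (t : List Int) (x : Int), ∃ b rs, pvRanges x t = (x, b) :: rs := by
  intro t
  induction t with
  | nil => intro x; exact ⟨x, [], rfl⟩
  | cons y t ih =>
    intro x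
    by_cases h : y = x + 1
    · obtain ⟨b, rs, hb⟩ := ih y
      subst h
      exact ⟨b, rs, by simp [pvRanges, hb, pvHeadRepl]⟩
    · exact ⟨x, pvRanges y t, by simp [pvRanges, h]⟩

lemma pvRun_eq : ∀ (t : List Int) (start prev : Int) (rr : List (Int × Int)),
    pvRun t start prev rr = rr ++ pvHeadRepl start (pvRanges prev t) := by
  intro t
  induction t with
  | nil => intro s p rr; simp [pvRun, pvRanges, pvHeadRepl]
  | cons y t ih =>
    intro s p rr
    by_cases h : y = p + 1
    · obtain ⟨b, rs, hb⟩ := pvRanges_shape t y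
      subst h
      simp [pvRun, ih, pvRanges, hb, pvHeadRepl]
    · obtain ⟨b, rs, hb⟩ := pvRanges_shape t y
      simp [pvRun, h, ih, pvRanges, hb, pvHeadRepl]

lemma pvGroups_eq : ∀ (t : List Int) (x n : Int),
    (pvGroupsA (PySem.List.enumerate (x :: t) n)).map pvPair = pvRanges x t := by
  intro t
  induction t with
  | nil =>
    intro x n
    simp [PySem.List.enumerate_cons, PySem.List.enumerate_nil, pvGroupsA, pvPair, pvRanges]
  | cons y t ih =>
    intro x n
    by_cases h : y = x + 1
    · subst h
      have hk : pvKey ((n : Int) + 1, x + 1) = pvKey (n, x) := by simp [pvKey]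
      have hsub := ih (x + 1) (n + 1)
      rw [PySem.List.enumerate_cons] at hsub
      rw [pvGroupsA] at hsub
      rw [hk] at hsub
      rw [PySem.List.enumerate_cons, PySem.List.enumerate_cons, pvGroupsA]
      have hP : (pvKey ((n : Int) + 1, x + 1) == pvKey (n, x)) = true := by
        simp [pvKey]
      rw [List.takeWhile_cons, List.dropWhile_cons]
      simp only [hP, if_true]
      rw [pvRanges, if_pos rfl]
      rw [← hsub]
      simp [List.map_cons, pvHeadRepl, pvPair]
    · rw [PySem.List.enumerate_cons, PySem.List.enumerate_cons, pvGroupsA]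
      have hP : (pvKey ((n : Int) + 1, y) == pvKey (n, x)) = false := by
        simp [pvKey]; omega
      rw [List.takeWhile_cons, List.dropWhile_cons]
      simp only [hP, Bool.false_eq_true, if_false]
      rw [pvRanges, if_neg h, ← ih y (n + 1), PySem.List.enumerate_cons]
      simp [pvPair]

lemma pvCollapse_eq (xs : List Int) :
    pvCollapse xs = (pvGroupsA (PySem.List.enumerate xs)).map pvPair := by
  cases xs with
  | nil => simp [pvCollapse, PySem.List.enumerate, pvGroupsA]
  | cons x t =>
    rw [pvCollapse, pvRun_eq, pvGroups_eq t x 0]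
    obtain ⟨b, rs, hb⟩ := pvRanges_shape t x
    simp [hb, pvHeadRepl]

lemma pvRangesA_eq (v : List Int) :
    pvRangesA v = pvCollapse (PySem.List.sorted v (fun x => x) false) := by
  rw [pvRangesA, pvCollapse_eq]

-- ===== VERDICT (by name: the statement is the Claim_ definition above) =====
theorem get_residues_colors_spec : Claim_equal_get_residues_colors := by
  intro hr _
  unfold Spec_get_residues_colors get_residues_colors get_residues_colors_alt
  simp only [pvRangesA_eq]
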